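-- pv_equiv track=rewrite | github.com/TejaGunupudi/Unstructured_to_structured | nebraska_pipeline/temp_functions/helper_functions.py | extract_qualifications_section
-- ===== SOURCE A (Python) =====
-- def extract_qualifications_section(text, keyword):
--     lines = text.split("\n")
--
--     extracted_sections = []
--     inside_section = False
--     current_section = []
--
--     for line in lines:
--         if keyword in line and "#" in line:
--             if inside_section:
--                 extracted_sections.append("\n".join(current_section))
--                 current_section = []
--             inside_section = True
--         elif inside_section and "#" in line:
--             inside_section = False
--             extracted_sections.append("\n".join(current_section))
--             current_section = []
--         if inside_section:
--             current_section.append(line)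
--
--     if inside_section:
--         extracted_sections.append("\n".join(current_section))
--
--     return "\n".join(extracted_sections)
-- ===== SOURCE B (Python) =====
-- def extract_qualifications_section(text, keyword):
--     lines = text.split("\n")
--     n = len(lines)
--     sections = []
--     i = 0
--     while i < n:
--         line = lines[i]
--         if keyword in line and "#" in line:
--             j = i + 1
--             while j < n and "#" not in lines[j]:
--                 j += 1
--             sections.append("\n".join(lines[i:j]))
--             i = j
--         else:
--             i += 1
--     return "\n".join(sections)
-- ===== Notes on version B (the rewrite author's own statement) =====
-- stated objective: alternative
-- what changed: Replaces A's inside_section state machine (one fold carrying extracted/inside/current plus a final flush) by an outer index loop that jumps from each start-marker line to the next '#' line and slices the section out directly.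
import Mathlib
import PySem

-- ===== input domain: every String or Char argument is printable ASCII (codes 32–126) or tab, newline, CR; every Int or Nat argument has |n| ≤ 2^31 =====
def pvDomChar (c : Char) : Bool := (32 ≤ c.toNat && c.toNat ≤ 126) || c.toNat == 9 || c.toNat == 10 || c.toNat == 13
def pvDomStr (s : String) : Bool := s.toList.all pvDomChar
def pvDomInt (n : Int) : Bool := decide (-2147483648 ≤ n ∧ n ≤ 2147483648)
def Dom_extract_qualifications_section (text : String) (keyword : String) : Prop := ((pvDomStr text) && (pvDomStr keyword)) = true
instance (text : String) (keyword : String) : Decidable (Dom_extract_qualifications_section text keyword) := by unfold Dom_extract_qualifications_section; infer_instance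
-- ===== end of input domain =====

-- B replaces A's inside_section state machine by an outer index loop that, at each
-- start-marker line, scans forward to the next '#' line and slices the section out
-- (objective: alternative decomposition, same cost).

-- ===== PORT A =====
-- the two membership tests of A's branches ('keyword in line', '"#" in line')
def pvHash (line : String) : Bool := PySem.Str.isIn "#" line
def pvStart (keyword line : String) : Bool := PySem.Str.isIn keyword line && pvHash line
-- loop body of A's for-loop: state = (extracted_sections, inside_section, current_section)
def pvStepA (keyword : String) (st : List String × Bool × List String) (line : String) :
    List String × Bool × List String :=
  let st' :=
    if pvStart keyword line then
      (if st.2.1 then st.1 ++ [PySem.Str.join "\n" st.2.2] else st.1, true,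
       if st.2.1 then ([] : List String) else st.2.2)
    else if st.2.1 && pvHash line then
      (st.1 ++ [PySem.Str.join "\n" st.2.2], false, ([] : List String))
    else st
  if st'.2.1 then (st'.1, st'.2.1, st'.2.2 ++ [line]) else st'

-- the final 'if inside_section: extracted_sections.append(...)'
def pvFinA (st : List String × Bool × List String) : List String :=
  if st.2.1 then st.1 ++ [PySem.Str.join "\n" st.2.2] else st.1

def extract_qualifications_section (text : String) (keyword : String) : String :=
  let lines := ((PySem.Str.split? text "\n").getD [])
  PySem.Str.join "\n" (pvFinA (lines.foldl (pvStepA keyword) ([], false, [])))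

-- ===== PORT B =====
-- B's outer while-loop: skip non-start lines; at a start marker take lines up to the
-- next '#' line (lines[i:j]) as one section and resume there (i = j).
def pvGoB (keyword : String) : List String → List String
  | [] => []
  | line :: rest =>
    if pvStart keyword line then
      PySem.Str.join "\n" (line :: rest.takeWhile (fun l => !(pvHash l)))
        :: pvGoB keyword (rest.dropWhile (fun l => !(pvHash l)))
    else pvGoB keyword rest
termination_by lines => lines.length
decreasing_by
  · exact Nat.lt_succ_of_le (rest.dropWhile_sublist _).length_le
  · exact Nat.lt_succ_self _

def extract_qualifications_section_alt (text : String) (keyword : String) : String :=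
  PySem.Str.join "\n" (pvGoB keyword (((PySem.Str.split? text "\n").getD [])))

-- ===== PRECONDITION & SPEC =====
def Spec_extract_qualifications_section (text : String) (keyword : String) (out : String) : Prop := out = extract_qualifications_section_alt text keyword
instance (text : String) (keyword : String) (out : String) : Decidable (Spec_extract_qualifications_section text keyword out) := by unfold Spec_extract_qualifications_section; infer_instance

-- ===== CLAIM (what is proved, stated in full; the proofs are below) =====
def Claim_equal_extract_qualifications_section : Prop := ∀ (text : String) (keyword : String), Dom_extract_qualifications_section text keyword → Spec_extract_qualifications_section text keyword (extract_qualifications_section text keyword)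

-- ===== LEMMAS AND PROOFS =====

-- invariant of A's fold, in both modes, against B's section list
theorem pvGoB_cons (kw line : String) (rest : List String) :
    pvGoB kw (line :: rest) =
      if pvStart kw line then
        PySem.Str.join "\n" (line :: rest.takeWhile (fun l => !(pvHash l)))
          :: pvGoB kw (rest.dropWhile (fun l => !(pvHash l)))
      else pvGoB kw rest := by
  rw [pvGoB]

theorem pv_main (kw : String) (lines : List String) :
    (∀ ext, pvFinA (lines.foldl (pvStepA kw) (ext, false, [])) = ext ++ pvGoB kw lines) ∧
    (∀ ext cur, pvFinA (lines.foldl (pvStepA kw) (ext, true, cur)) =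
      ext ++ [PySem.Str.join "\n" (cur ++ lines.takeWhile (fun l => !(pvHash l)))]
        ++ pvGoB kw (lines.dropWhile (fun l => !(pvHash l)))) := by
  induction lines with
  | nil => simp [pvFinA, pvGoB]
  | cons line rest ih =>
    constructor
    · intro ext
      by_cases hs : (pvStart kw line) = true
      · have hh : pvHash line = true := by
          have h2 := hs; simp only [pvStart, Bool.and_eq_true] at h2; exact h2.2
        have e : pvStepA kw (ext, false, []) line = (ext, true, [line]) := by
          simp [pvStepA, hs]
        rw [List.foldl_cons, e, ih.2]
        simp [pvGoB_cons, hs]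
      · have e : pvStepA kw (ext, false, []) line = (ext, false, []) := by
          simp [pvStepA, hs]
        rw [List.foldl_cons, e, ih.1]
        simp [pvGoB_cons, hs]
    · intro ext cur
      by_cases hs : (pvStart kw line) = true
      · have hh : pvHash line = true := by
          have h2 := hs; simp only [pvStart, Bool.and_eq_true] at h2; exact h2.2
        have e : pvStepA kw (ext, true, cur) line
            = (ext ++ [PySem.Str.join "\n" cur], true, [line]) := by
          simp [pvStepA, hs]
        rw [List.foldl_cons, e, ih.2]
        simp [pvGoB_cons, hs, hh]
      · by_cases hh : pvHash line = true
        · have e : pvStepA kw (ext, true, cur) line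
              = (ext ++ [PySem.Str.join "\n" cur], false, []) := by
            simp [pvStepA, hs, hh]
          rw [List.foldl_cons, e, ih.1]
          simp [pvGoB_cons, hs, hh]
        · have e : pvStepA kw (ext, true, cur) line = (ext, true, cur ++ [line]) := by
            simp [pvStepA, hs, hh]
          rw [List.foldl_cons, e, ih.2]
          simp [hh, List.append_assoc]

-- ===== VERDICT (by name: the statement is the Claim_ definition above) =====
theorem extract_qualifications_section_spec : Claim_equal_extract_qualifications_section := by
  intro text keyword _
  show extract_qualifications_section text keyword = _
  unfold extract_qualifications_section extract_qualifications_section_alt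
  show PySem.Str.join "\n"
      (pvFinA (List.foldl (pvStepA keyword) ([], false, []) ((PySem.Str.split? text "\n").getD []))) = _
  rw [(pv_main keyword ((PySem.Str.split? text "\n").getD [])).1 []]
  rfl
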